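-- pv_equiv track=rewrite | github.com/daniel-reich/turbo-robot | 8cJnRPxtjNP64k5fq_14.py | dance
-- ===== SOURCE A (Python) =====
-- def dance(lst, parameter):
--   w = [i[0] for i in lst]
--   m = [i[1] for i in lst]
--   if parameter == "men":
--     ret = list(zip(w,m[::-1]))
--   else:
--     ret = list(zip(w[::-1],m))
--   return [list(i) for i in ret]
-- ===== SOURCE B (Python) =====
-- def dance(lst, parameter):
--   # Two-pointer inward sweep: walk i from the front and j from the back at once,
--   # emitting the result's front half and (mirrored) back half in one pass;
--   # no unzip/reverse/zip pipeline over separate component lists.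
--   if parameter == "men":
--     def pair(a, b):
--       return [a[0], b[1]]
--   else:
--     def pair(a, b):
--       return [b[0], a[1]]
--   front, back = [], []
--   i, j = 0, len(lst) - 1
--   while i < j:
--     front.append(pair(lst[i], lst[j]))
--     back.append(pair(lst[j], lst[i]))
--     i += 1
--     j -= 1
--   if i == j:
--     front.append(pair(lst[i], lst[i]))
--   back.reverse()
--   return front + back
-- ===== Notes on version B (the rewrite author's own statement) =====
-- stated objective: alternative
-- what changed: Replaces the unzip/slice-reverse/zip/relist pipeline with a two-pointer inward sweep: one while loop walks i forward and j backward, building the result's front half and mirrored back half simultaneously, then concatenates front with the reversed back half.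
-- outside the precondition, e.g. on dance([[1]], 'men'): A raises IndexError, B raises IndexError
import Mathlib
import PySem

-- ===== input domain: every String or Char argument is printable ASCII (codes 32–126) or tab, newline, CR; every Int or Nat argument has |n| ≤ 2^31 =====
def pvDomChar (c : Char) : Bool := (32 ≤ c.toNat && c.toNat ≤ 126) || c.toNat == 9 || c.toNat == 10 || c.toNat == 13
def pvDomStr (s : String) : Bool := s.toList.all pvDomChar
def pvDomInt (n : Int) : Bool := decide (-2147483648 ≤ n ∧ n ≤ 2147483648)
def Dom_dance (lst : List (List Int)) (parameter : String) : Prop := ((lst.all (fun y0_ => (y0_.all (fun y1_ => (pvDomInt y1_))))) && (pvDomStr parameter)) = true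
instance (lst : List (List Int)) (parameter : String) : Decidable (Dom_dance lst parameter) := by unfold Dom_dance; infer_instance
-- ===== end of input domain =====

-- B replaces the unzip/reverse/zip pipeline by a two-pointer inward sweep building the
-- result's front and mirrored back halves in one loop; proved equal wherever A returns.

-- ===== PORT A =====
-- i[0] / i[1] raise IndexError on inner lists shorter than 2; Pre_dance excludes those,
-- so the defaulted lookups here are exact on the admitted inputs.
def dance (lst : List (List Int)) (parameter : String) : List (List Int) :=
  let w := lst.map (fun i => PySem.List.pyGetD i 0 0)
  let m := lst.map (fun i => PySem.List.pyGetD i 1 0)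
  let ret := if parameter == "men"
    then w.zip ((PySem.List.slice? m none none (-1)).getD [])
    else ((PySem.List.slice? w none none (-1)).getD []).zip m
  ret.map (fun p => [p.1, p.2])

-- ===== PORT B =====
-- the while loop: i walks forward, j walks backward, appending to front and back
def danceLoop (pair : List Int → List Int → List Int) (lst : List (List Int))
    (i j : Int) (front back : List (List Int)) :
    List (List Int) × List (List Int) × Int × Int :=
  if i < j then
    danceLoop pair lst (i + 1) (j - 1)
      (front ++ [pair (PySem.List.pyGetD lst i []) (PySem.List.pyGetD lst j [])])
      (back ++ [pair (PySem.List.pyGetD lst j []) (PySem.List.pyGetD lst i [])])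
  else (front, back, i, j)
termination_by (j - i).toNat
decreasing_by omega

def dance_alt (lst : List (List Int)) (parameter : String) : List (List Int) :=
  let pair := if parameter == "men"
    then fun (a b : List Int) => [PySem.List.pyGetD a 0 0, PySem.List.pyGetD b 1 0]
    else fun (a b : List Int) => [PySem.List.pyGetD b 0 0, PySem.List.pyGetD a 1 0]
  let r := danceLoop pair lst 0 ((lst.length : Int) - 1) [] []
  let front := if r.2.2.1 == r.2.2.2
    then r.1 ++ [pair (PySem.List.pyGetD lst r.2.2.1 []) (PySem.List.pyGetD lst r.2.2.1 [])]
    else r.1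
  front ++ r.2.1.reverse

-- ===== PRECONDITION & SPEC =====
-- Pre_ excludes exactly the inputs where Python A raises IndexError: an inner list of length < 2.
def Pre_dance (lst : List (List Int)) (parameter : String) : Prop :=
  ∀ x ∈ lst, 2 ≤ x.length
instance (lst : List (List Int)) (parameter : String) : Decidable (Pre_dance lst parameter) := by
  unfold Pre_dance; infer_instance
def pvWitness_dance : List (List Int) × String := ([[1, 2], [3, 4], [5, 6]], "men")

def Spec_dance (lst : List (List Int)) (parameter : String) (out : List (List Int)) : Prop := out = dance_alt lst parameter
instance (lst : List (List Int)) (parameter : String) (out : List (List Int)) : Decidable (Spec_dance lst parameter out) := by unfold Spec_dance; infer_instance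

-- ===== CLAIM (what is proved, stated in full; the proofs are below) =====
def Claim_equal_dance : Prop := ∀ (lst : List (List Int)) (parameter : String), Dom_dance lst parameter → Pre_dance lst parameter → Spec_dance lst parameter (dance lst parameter)

-- ===== LEMMAS AND PROOFS =====

-- zipRev pair seg: each element of seg paired with its mirror, the target shape of both ports
def zipRev (pair : List Int → List Int → List Int) (seg : List (List Int)) : List (List Int) :=
  (seg.zip seg.reverse).map (fun p => pair p.1 p.2)

theorem zipRev_nil (pair : List Int → List Int → List Int) : zipRev pair [] = [] := rfl

theorem zipRev_single (pair : List Int → List Int → List Int) (x : List Int) :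
    zipRev pair [x] = [pair x x] := rfl

-- peeling both ends off zipRev
theorem zipRev_cons_append (pair : List Int → List Int → List Int)
    (a c : List Int) (mid : List (List Int)) :
    zipRev pair (a :: (mid ++ [c])) = pair a c :: (zipRev pair mid ++ [pair c a]) := by
  unfold zipRev
  have hrev : (a :: (mid ++ [c])).reverse = c :: (mid.reverse ++ [a]) := by simp
  rw [hrev, List.zip_cons_cons, List.zip_append (by simp)]
  simp

-- the segment lst[i..j] decomposes into lst[i], the inner segment, lst[j]
theorem seg_decomp (lst : List (List Int)) (a b : Nat) (ha : a < b) (hb : b < lst.length) :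
    (lst.drop a).take (b + 1 - a) =
      lst[a] :: (((lst.drop (a + 1)).take (b - 1 - a)) ++ [lst[b]]) := by
  apply List.ext_getElem
  · simp; omega
  · intro k h1 h2
    simp only [List.length_take, List.length_drop] at h1
    simp only [List.getElem_take, List.getElem_drop]
    cases k with
    | zero => simp
    | succ k' =>
      simp only [List.getElem_cons_succ]
      have hlen2 : ((lst.drop (a + 1)).take (b - 1 - a)).length = b - 1 - a := by
        simp only [List.length_take, List.length_drop]; omega
      by_cases hk : k' < b - 1 - a
      · rw [List.getElem_append_left (by rw [hlen2]; omega)]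
        simp only [List.getElem_take, List.getElem_drop]
        congr 1; omega
      · rw [List.getElem_append_right (by rw [hlen2]; omega)]
        rw [List.getElem_singleton]
        congr 1; omega

-- loop invariant: the composed result of the loop (front half, optional middle, reversed
-- back half) equals the accumulators followed by zipRev of the remaining segment lst[i..j]
theorem danceLoop_comp (pair : List Int → List Int → List Int) (lst : List (List Int)) :
    ∀ (fuel : Nat) (i j : Int) (front back : List (List Int)),
      (j - i).toNat ≤ fuel → 0 ≤ i → j < (lst.length : Int) →
      (if (danceLoop pair lst i j front back).2.2.1 == (danceLoop pair lst i j front back).2.2.2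
         then (danceLoop pair lst i j front back).1 ++
           [pair (PySem.List.pyGetD lst (danceLoop pair lst i j front back).2.2.1 [])
                 (PySem.List.pyGetD lst (danceLoop pair lst i j front back).2.2.1 [])]
         else (danceLoop pair lst i j front back).1) ++
        (danceLoop pair lst i j front back).2.1.reverse
      = front ++ zipRev pair ((lst.drop i.toNat).take (j + 1 - i).toNat) ++ back.reverse := by
  intro fuel
  induction fuel with
  | zero =>
    intro i j front back hf hi hj
    have hij : ¬ i < j := by omega
    rw [danceLoop, if_neg hij]
    by_cases he : i = j
    · subst he
      have hin : i.toNat < lst.length := by omega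
      have hseg : (lst.drop i.toNat).take 1 = [lst[i.toNat]] := by
        rw [List.take_one, List.head?_drop, List.getElem?_eq_getElem hin]
        simp
      have hget : PySem.List.pyGetD lst i [] = lst[i.toNat] := by
        conv_lhs => rw [show i = ((i.toNat : Nat) : Int) from by omega]
        rw [PySem.List.pyGetD_natCast, List.getD_eq_getElem _ _ hin]
      simp [hseg, zipRev_single, hget]
    · have hne : (i == j) = false := by simp [he]
      have hseg : (j + 1 - i).toNat = 0 := by omega
      simp [hne, hseg, zipRev_nil]
  | succ fuel ih =>
    intro i j front back hf hi hj
    by_cases hij : i < j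
    · rw [danceLoop, if_pos hij]
      have step := ih (i + 1) (j - 1)
        (front ++ [pair (PySem.List.pyGetD lst i []) (PySem.List.pyGetD lst j [])])
        (back ++ [pair (PySem.List.pyGetD lst j []) (PySem.List.pyGetD lst i [])])
        (by omega) (by omega) (by omega)
      rw [step]
      have hin : i.toNat < lst.length := by omega
      have hjn : j.toNat < lst.length := by omega
      have hgi : PySem.List.pyGetD lst i [] = lst[i.toNat] := by
        conv_lhs => rw [show i = ((i.toNat : Nat) : Int) from by omega]
        rw [PySem.List.pyGetD_natCast, List.getD_eq_getElem _ _ hin]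
      have hgj : PySem.List.pyGetD lst j [] = lst[j.toNat] := by
        conv_lhs => rw [show j = ((j.toNat : Nat) : Int) from by omega]
        rw [PySem.List.pyGetD_natCast, List.getD_eq_getElem _ _ hjn]
      have hseg := seg_decomp lst i.toNat j.toNat (by omega) hjn
      have e1 : (j + 1 - i).toNat = j.toNat + 1 - i.toNat := by omega
      have e2 : ((i + 1 : Int)).toNat = i.toNat + 1 := by omega
      have e3 : (j - 1 + 1 - (i + 1)).toNat = j.toNat - 1 - i.toNat := by omega
      rw [e1, hseg, zipRev_cons_append] at *
      rw [e2, e3] at step ⊢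
      simp [hgi, hgj]
    · have h0 := ih i j front back (by omega) hi hj
      exact h0

-- the loop from (0, n-1) with empty accumulators yields zipRev of the whole list
theorem dance_alt_eq_zipRev (lst : List (List Int)) (parameter : String) :
    dance_alt lst parameter =
      zipRev (if parameter == "men"
        then fun (a b : List Int) => [PySem.List.pyGetD a 0 0, PySem.List.pyGetD b 1 0]
        else fun (a b : List Int) => [PySem.List.pyGetD b 0 0, PySem.List.pyGetD a 1 0]) lst := by
  have h := danceLoop_comp
    (if parameter == "men"
      then fun (a b : List Int) => [PySem.List.pyGetD a 0 0, PySem.List.pyGetD b 1 0]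
      else fun (a b : List Int) => [PySem.List.pyGetD b 0 0, PySem.List.pyGetD a 1 0]) lst
    ((lst.length : Int) - 1 - 0).toNat 0 ((lst.length : Int) - 1) [] []
    (le_refl _) (by omega) (by omega)
  have hlen : ((lst.length : Int) - 1 + 1 - 0).toNat = lst.length := by omega
  rw [hlen] at h
  unfold dance_alt
  simp only [h, Int.toNat_zero, List.drop_zero, List.take_length, List.append_nil,
    List.reverse_nil, List.nil_append]

-- ===== VERDICT (by name: the statement is the Claim_ definition above) =====
theorem dance_spec : Claim_equal_dance := by
  intro lst parameter _ _
  unfold Spec_dance dance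
  rw [dance_alt_eq_zipRev]
  unfold zipRev
  simp only [PySem.List.slice?_none_none_neg_one, Option.getD_some]
  by_cases hp : (parameter == "men") = true <;>
    simp only [hp, if_pos, if_neg, Bool.false_eq_true, not_false_iff] <;>
    (apply List.ext_getElem
     · simp
     · intro i h1 h2
       simp only [List.length_map, List.length_zip, List.length_reverse] at h1 h2
       simp [List.getElem_zip, List.getElem_reverse])
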